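-- pv_equiv track=rewrite | github.com/luckyduckcode/brain-cluster-ai | digital_cortex/motor_cortex/tool_integration.py | select_tool
-- ===== SOURCE A (Python) =====
-- from typing import Dict, Any, Optional, List
--
-- def select_tool(task_description: str) -> Optional[str]:
--     """
--     Intelligently select the most appropriate tool for a task.
--
--     Args:
--         task_description: Description of the task to perform
--
--     Returns:
--         Name of the selected tool, or None if no suitable tool found
--     """
--     task_lower = task_description.lower()
--
--     # Simple keyword-based tool selection
--     # This could be enhanced with ML-based tool selection
--
--     # Check for explicit tool names first
--     if 'calculator' in task_lower:
--         return 'calculator'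
--     elif 'web_search' in task_lower or 'search' in task_lower:
--         return 'web_search'
--     elif 'code_execution' in task_lower or ('execute' in task_lower and 'code' in task_lower):
--         return 'code_execution'
--     elif 'knowledge_base' in task_lower:
--         return 'knowledge_base'
--
--     # Fallback to general keywords
--     if any(word in task_lower for word in ['calculate', 'math', 'compute', 'solve', 'equation']):
--         return 'calculator'
--     elif any(word in task_lower for word in ['search', 'web', 'internet', 'find', 'lookup']):
--         return 'web_search'
--     elif any(word in task_lower for word in ['run', 'execute', 'code', 'program', 'script']):
--         return 'code_execution'
--     elif any(word in task_lower for word in ['fact', 'knowledge', 'convert', 'unit']):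
--         return 'knowledge_base'
--
--     return None
-- ===== SOURCE B (Python) =====
-- def select_tool(task_description):
--     s = task_description.lower()
--     # Flat keyword table: (keyword, priority, tool); lower priority wins.
--     table = [
--         ('calculator', 0, 'calculator'),
--         ('web_search', 1, 'web_search'), ('search', 1, 'web_search'),
--         ('code_execution', 2, 'code_execution'),
--         ('knowledge_base', 3, 'knowledge_base'),
--         ('calculate', 4, 'calculator'), ('math', 4, 'calculator'), ('compute', 4, 'calculator'),
--         ('solve', 4, 'calculator'), ('equation', 4, 'calculator'),
--         ('search', 5, 'web_search'), ('web', 5, 'web_search'), ('internet', 5, 'web_search'),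
--         ('find', 5, 'web_search'), ('lookup', 5, 'web_search'),
--         ('run', 6, 'code_execution'), ('execute', 6, 'code_execution'), ('code', 6, 'code_execution'),
--         ('program', 6, 'code_execution'), ('script', 6, 'code_execution'),
--         ('fact', 7, 'knowledge_base'), ('knowledge', 7, 'knowledge_base'),
--         ('convert', 7, 'knowledge_base'), ('unit', 7, 'knowledge_base'),
--     ]
--     best = None
--     for kw, prio, tool in table:
--         if kw in s and (best is None or prio < best[0]):
--             best = (prio, tool)
--     # the one conjunctive rule: 'execute' AND 'code' together rank at priority 2
--     if 'execute' in s and 'code' in s and (best is None or 2 < best[0]):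
--         best = (2, 'code_execution')
--     return best[1] if best is not None else None
-- ===== Notes on version B (the rewrite author's own statement) =====
-- stated objective: alternative
-- what changed: Replaced the two if/elif cascades with a flat (keyword, priority, tool) table folded once to the minimum-priority match (plus the one conjunctive execute+code rule at priority 2), instead of short-circuiting rule groups.
import Mathlib
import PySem

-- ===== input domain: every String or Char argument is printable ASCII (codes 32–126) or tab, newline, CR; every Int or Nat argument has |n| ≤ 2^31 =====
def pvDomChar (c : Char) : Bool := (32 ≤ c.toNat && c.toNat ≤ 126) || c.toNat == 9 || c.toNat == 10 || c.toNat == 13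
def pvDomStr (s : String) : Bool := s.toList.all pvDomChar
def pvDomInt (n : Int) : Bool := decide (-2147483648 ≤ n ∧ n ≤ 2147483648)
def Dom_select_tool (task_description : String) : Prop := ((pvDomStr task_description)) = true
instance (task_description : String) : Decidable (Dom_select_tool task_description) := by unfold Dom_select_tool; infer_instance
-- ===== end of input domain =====

-- B replaces the two if/elif cascades with a flat (keyword, priority, tool) table folded once to the minimum-priority match, plus the one conjunctive execute+code rule at priority 2 (alternative decomposition, same cost).


-- ===== PORT A =====
def select_tool (task_description : String) : Option String :=
  let task_lower := PySem.Str.lower task_description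
  if PySem.Str.isIn "calculator" task_lower then some "calculator"
  else if PySem.Str.isIn "web_search" task_lower || PySem.Str.isIn "search" task_lower then some "web_search"
  else if PySem.Str.isIn "code_execution" task_lower || (PySem.Str.isIn "execute" task_lower && PySem.Str.isIn "code" task_lower) then some "code_execution"
  else if PySem.Str.isIn "knowledge_base" task_lower then some "knowledge_base"
  else if (["calculate", "math", "compute", "solve", "equation"] : List String).any (fun w => PySem.Str.isIn w task_lower) then some "calculator"
  else if (["search", "web", "internet", "find", "lookup"] : List String).any (fun w => PySem.Str.isIn w task_lower) then some "web_search"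
  else if (["run", "execute", "code", "program", "script"] : List String).any (fun w => PySem.Str.isIn w task_lower) then some "code_execution"
  else if (["fact", "knowledge", "convert", "unit"] : List String).any (fun w => PySem.Str.isIn w task_lower) then some "knowledge_base"
  else none

-- ===== PORT B =====
-- flat keyword table: (keyword, priority, tool); the lowest matching priority wins
def selectToolTable : List (String × Nat × String) :=
  [ ("calculator", 0, "calculator"),
    ("web_search", 1, "web_search"), ("search", 1, "web_search"),
    ("code_execution", 2, "code_execution"),
    ("knowledge_base", 3, "knowledge_base"),
    ("calculate", 4, "calculator"), ("math", 4, "calculator"), ("compute", 4, "calculator"),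
    ("solve", 4, "calculator"), ("equation", 4, "calculator"),
    ("search", 5, "web_search"), ("web", 5, "web_search"), ("internet", 5, "web_search"),
    ("find", 5, "web_search"), ("lookup", 5, "web_search"),
    ("run", 6, "code_execution"), ("execute", 6, "code_execution"), ("code", 6, "code_execution"),
    ("program", 6, "code_execution"), ("script", 6, "code_execution"),
    ("fact", 7, "knowledge_base"), ("knowledge", 7, "knowledge_base"),
    ("convert", 7, "knowledge_base"), ("unit", 7, "knowledge_base") ]

-- one fold step: keep the best (minimum-priority) match seen so far
def selectToolStep (s : String) (best : Option (Nat × String)) (e : String × Nat × String) : Option (Nat × String) :=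
  if PySem.Str.isIn e.1 s && best.all (fun b => decide (e.2.1 < b.1)) then some (e.2.1, e.2.2) else best

def select_tool_alt (task_description : String) : Option String :=
  let s := PySem.Str.lower task_description
  let best := selectToolTable.foldl (selectToolStep s) none
  -- the one conjunctive rule: 'execute' AND 'code' together rank at priority 2
  let best := if PySem.Str.isIn "execute" s && PySem.Str.isIn "code" s && best.all (fun b => decide (2 < b.1)) then some (2, "code_execution") else best
  best.map (fun b => b.2)

-- ===== PRECONDITION & SPEC =====
def Spec_select_tool (task_description : String) (out : Option String) : Prop := out = select_tool_alt task_description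
instance (task_description : String) (out : Option String) : Decidable (Spec_select_tool task_description out) := by unfold Spec_select_tool; infer_instance

-- ===== CLAIM (what is proved, stated in full; the proofs are below) =====
def Claim_equal_select_tool : Prop := ∀ (task_description : String), Dom_select_tool task_description → Spec_select_tool task_description (select_tool task_description)

-- ===== LEMMAS AND PROOFS =====

-- once the best has priority p, entries of priority ≥ p never replace it
theorem foldl_frozen (s : String) (p : Nat) (tool : String) :
    ∀ (l : List (String × Nat × String)), (∀ e ∈ l, p ≤ e.2.1) →
      l.foldl (selectToolStep s) (some (p, tool)) = some (p, tool) := by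
  intro l
  induction l with
  | nil => intro _; rfl
  | cons e l ih =>
    intro h
    have he : ¬ (e.2.1 < p) := Nat.not_lt.2 (h e List.mem_cons_self)
    simp only [List.foldl_cons, selectToolStep, Option.all_some]
    rw [if_neg (by simp [he])]
    exact ih (fun e' h' => h e' (List.mem_cons_of_mem _ h'))

-- folding a same-priority, same-tool group from none yields the group's answer iff any keyword matches
theorem foldl_group (s : String) (p : Nat) (tool : String) :
    ∀ (l : List (String × Nat × String)), (∀ e ∈ l, e.2.1 = p ∧ e.2.2 = tool) →
      l.foldl (selectToolStep s) none =
        (if l.any (fun e => PySem.Str.isIn e.1 s) then some (p, tool) else none) := by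
  intro l
  induction l with
  | nil => intro _; rfl
  | cons e l ih =>
    intro h
    obtain ⟨hp, ht⟩ := h e List.mem_cons_self
    cases hi : PySem.Str.isIn e.1 s with
    | true =>
      simp only [List.foldl_cons, selectToolStep, hi, Option.all_none, Bool.and_true, hp, ht]
      rw [if_pos trivial]
      rw [foldl_frozen s p tool l (fun e' h' => (h e' (List.mem_cons_of_mem _ h')).1 ▸ Nat.le_refl p)]
      simp only [List.any_cons, hi, Bool.true_or]
      rw [if_pos trivial]
    | false =>
      simp only [List.foldl_cons, selectToolStep, hi, Bool.false_and, Bool.false_eq_true, if_false]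
      rw [ih (fun e' h' => h e' (List.mem_cons_of_mem _ h'))]
      simp only [List.any_cons, hi, Bool.false_or]

-- the fold over the whole table, characterised as a priority cascade
theorem fold_table (s : String) :
    selectToolTable.foldl (selectToolStep s) none =
    (if PySem.Str.isIn "calculator" s then some ((0:Nat), "calculator")
     else if PySem.Str.isIn "web_search" s || PySem.Str.isIn "search" s then some (1, "web_search")
     else if PySem.Str.isIn "code_execution" s then some (2, "code_execution")
     else if PySem.Str.isIn "knowledge_base" s then some (3, "knowledge_base")
     else if (["calculate", "math", "compute", "solve", "equation"] : List String).any (fun w => PySem.Str.isIn w s) then some (4, "calculator")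
     else if (["search", "web", "internet", "find", "lookup"] : List String).any (fun w => PySem.Str.isIn w s) then some (5, "web_search")
     else if (["run", "execute", "code", "program", "script"] : List String).any (fun w => PySem.Str.isIn w s) then some (6, "code_execution")
     else if (["fact", "knowledge", "convert", "unit"] : List String).any (fun w => PySem.Str.isIn w s) then some (7, "knowledge_base")
     else none) := by
  have hsplit : selectToolTable =
      [("calculator", 0, "calculator")]
      ++ [("web_search", 1, "web_search"), ("search", 1, "web_search")]
      ++ [("code_execution", 2, "code_execution")]
      ++ [("knowledge_base", 3, "knowledge_base")]
      ++ [("calculate", 4, "calculator"), ("math", 4, "calculator"), ("compute", 4, "calculator"), ("solve", 4, "calculator"), ("equation", 4, "calculator")]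
      ++ [("search", 5, "web_search"), ("web", 5, "web_search"), ("internet", 5, "web_search"), ("find", 5, "web_search"), ("lookup", 5, "web_search")]
      ++ [("run", 6, "code_execution"), ("execute", 6, "code_execution"), ("code", 6, "code_execution"), ("program", 6, "code_execution"), ("script", 6, "code_execution")]
      ++ [("fact", 7, "knowledge_base"), ("knowledge", 7, "knowledge_base"), ("convert", 7, "knowledge_base"), ("unit", 7, "knowledge_base")] := rfl
  rw [hsplit]
  simp only [List.foldl_append]
  rw [foldl_group s 0 "calculator" _ (by decide)]
  simp only [List.any_cons, List.any_nil, Bool.or_false]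
  cases h1 : PySem.Str.isIn "calculator" s with
  | true =>
    rw [if_pos rfl]
    rw [foldl_frozen s 0 "calculator" _ (by decide), foldl_frozen s 0 "calculator" _ (by decide),
        foldl_frozen s 0 "calculator" _ (by decide), foldl_frozen s 0 "calculator" _ (by decide),
        foldl_frozen s 0 "calculator" _ (by decide), foldl_frozen s 0 "calculator" _ (by decide),
        foldl_frozen s 0 "calculator" _ (by decide)]
    rw [if_pos rfl]
  | false =>
    rw [if_neg Bool.false_ne_true]
    rw [foldl_group s 1 "web_search" _ (by decide)]
    simp only [List.any_cons, List.any_nil, Bool.or_false]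
    cases h2 : PySem.Str.isIn "web_search" s || PySem.Str.isIn "search" s with
    | true =>
      rw [if_pos rfl]
      rw [foldl_frozen s 1 "web_search" _ (by decide), foldl_frozen s 1 "web_search" _ (by decide),
          foldl_frozen s 1 "web_search" _ (by decide), foldl_frozen s 1 "web_search" _ (by decide),
          foldl_frozen s 1 "web_search" _ (by decide), foldl_frozen s 1 "web_search" _ (by decide)]
      rw [if_neg Bool.false_ne_true, if_pos rfl]
    | false =>
      rw [if_neg Bool.false_ne_true]
      rw [foldl_group s 2 "code_execution" _ (by decide)]
      simp only [List.any_cons, List.any_nil, Bool.or_false]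
      cases h3 : PySem.Str.isIn "code_execution" s with
      | true =>
        rw [if_pos rfl]
        rw [foldl_frozen s 2 "code_execution" _ (by decide), foldl_frozen s 2 "code_execution" _ (by decide),
            foldl_frozen s 2 "code_execution" _ (by decide), foldl_frozen s 2 "code_execution" _ (by decide),
            foldl_frozen s 2 "code_execution" _ (by decide)]
        rw [if_neg Bool.false_ne_true, if_neg Bool.false_ne_true, if_pos rfl]
      | false =>
        rw [if_neg Bool.false_ne_true]
        rw [foldl_group s 3 "knowledge_base" _ (by decide)]
        simp only [List.any_cons, List.any_nil, Bool.or_false]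
        cases h4 : PySem.Str.isIn "knowledge_base" s with
        | true =>
          rw [if_pos rfl]
          rw [foldl_frozen s 3 "knowledge_base" _ (by decide), foldl_frozen s 3 "knowledge_base" _ (by decide),
              foldl_frozen s 3 "knowledge_base" _ (by decide), foldl_frozen s 3 "knowledge_base" _ (by decide)]
          rw [if_neg Bool.false_ne_true, if_neg Bool.false_ne_true, if_neg Bool.false_ne_true, if_pos rfl]
        | false =>
          rw [if_neg Bool.false_ne_true]
          rw [foldl_group s 4 "calculator" _ (by decide)]
          simp only [List.any_cons, List.any_nil, Bool.or_false]
          cases h5 : PySem.Str.isIn "calculate" s || (PySem.Str.isIn "math" s || (PySem.Str.isIn "compute" s || (PySem.Str.isIn "solve" s || PySem.Str.isIn "equation" s))) with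
          | true =>
            rw [if_pos rfl]
            rw [foldl_frozen s 4 "calculator" _ (by decide), foldl_frozen s 4 "calculator" _ (by decide),
                foldl_frozen s 4 "calculator" _ (by decide)]
            rw [if_neg Bool.false_ne_true, if_neg Bool.false_ne_true, if_neg Bool.false_ne_true, if_neg Bool.false_ne_true]
            rw [if_pos rfl]
          | false =>
            rw [if_neg Bool.false_ne_true]
            rw [foldl_group s 5 "web_search" _ (by decide)]
            simp only [List.any_cons, List.any_nil, Bool.or_false]
            cases h6 : PySem.Str.isIn "search" s || (PySem.Str.isIn "web" s || (PySem.Str.isIn "internet" s || (PySem.Str.isIn "find" s || PySem.Str.isIn "lookup" s))) with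
            | true =>
              rw [if_pos rfl]
              rw [foldl_frozen s 5 "web_search" _ (by decide), foldl_frozen s 5 "web_search" _ (by decide)]
              rw [if_neg Bool.false_ne_true, if_neg Bool.false_ne_true, if_neg Bool.false_ne_true, if_neg Bool.false_ne_true]
              rw [if_neg Bool.false_ne_true]
              rw [if_pos rfl]
            | false =>
              rw [if_neg Bool.false_ne_true]
              rw [foldl_group s 6 "code_execution" _ (by decide)]
              simp only [List.any_cons, List.any_nil, Bool.or_false]
              cases h7 : PySem.Str.isIn "run" s || (PySem.Str.isIn "execute" s || (PySem.Str.isIn "code" s || (PySem.Str.isIn "program" s || PySem.Str.isIn "script" s))) with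
              | true =>
                rw [if_pos rfl]
                rw [foldl_frozen s 6 "code_execution" _ (by decide)]
                rw [if_neg Bool.false_ne_true, if_neg Bool.false_ne_true, if_neg Bool.false_ne_true, if_neg Bool.false_ne_true]
                rw [if_neg Bool.false_ne_true]
                rw [if_neg Bool.false_ne_true]
                rw [if_pos rfl]
              | false =>
                rw [if_neg Bool.false_ne_true]
                rw [foldl_group s 7 "knowledge_base" _ (by decide)]
                simp only [List.any_cons, List.any_nil, Bool.or_false]
                cases h8 : PySem.Str.isIn "fact" s || (PySem.Str.isIn "knowledge" s || (PySem.Str.isIn "convert" s || PySem.Str.isIn "unit" s)) with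
                | true =>
                  rw [if_pos rfl]
                  rw [if_neg Bool.false_ne_true, if_neg Bool.false_ne_true, if_neg Bool.false_ne_true, if_neg Bool.false_ne_true]
                  rw [if_neg Bool.false_ne_true]
                  rw [if_neg Bool.false_ne_true]
                  rw [if_neg Bool.false_ne_true]
                | false =>
                  rw [if_neg Bool.false_ne_true]
                  rw [if_neg Bool.false_ne_true, if_neg Bool.false_ne_true, if_neg Bool.false_ne_true, if_neg Bool.false_ne_true]
                  rw [if_neg Bool.false_ne_true]
                  rw [if_neg Bool.false_ne_true]
                  rw [if_neg Bool.false_ne_true]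

-- ===== VERDICT (by name: the statement is the Claim_ definition above) =====
theorem select_tool_spec : Claim_equal_select_tool := by
  intro t _
  show select_tool t = select_tool_alt t
  simp only [select_tool, select_tool_alt, fold_table]
  generalize PySem.Str.isIn "calculator" (PySem.Str.lower t) = b1
  generalize PySem.Str.isIn "web_search" (PySem.Str.lower t) = b2
  generalize PySem.Str.isIn "search" (PySem.Str.lower t) = b3
  generalize PySem.Str.isIn "code_execution" (PySem.Str.lower t) = b4
  generalize PySem.Str.isIn "execute" (PySem.Str.lower t) = b5
  generalize PySem.Str.isIn "code" (PySem.Str.lower t) = b6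
  generalize PySem.Str.isIn "knowledge_base" (PySem.Str.lower t) = b7
  generalize (["calculate", "math", "compute", "solve", "equation"] : List String).any (fun w => PySem.Str.isIn w (PySem.Str.lower t)) = b8
  generalize (["search", "web", "internet", "find", "lookup"] : List String).any (fun w => PySem.Str.isIn w (PySem.Str.lower t)) = b9
  generalize (["run", "execute", "code", "program", "script"] : List String).any (fun w => PySem.Str.isIn w (PySem.Str.lower t)) = b10
  generalize (["fact", "knowledge", "convert", "unit"] : List String).any (fun w => PySem.Str.isIn w (PySem.Str.lower t)) = b11
  revert b1 b2 b3 b4 b5 b6 b7 b8 b9 b10 b11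
  decide
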